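-- pv_equiv track=rewrite | github.com/adrivrie/COMSOC-multi-winner-SAT | helperfunctions.py | isSubsetOf
-- ===== SOURCE A (Python) =====
-- def isSubsetOf(ballot1, ballot2, strict=True):
--     for b1,b2 in zip(ballot1, ballot2):
--         if b1 and not b2:
--             return False
--         if b2 and not b1:
--             strict = False
--
--     if strict:
--         return False
--     else:
--         return True
-- ===== SOURCE B (Python) =====
-- def isSubsetOf(ballot1, ballot2, strict=True):
--     violated = any(b1 and not b2 for b1, b2 in zip(ballot1, ballot2))
--     proper = any(b2 and not b1 for b1, b2 in zip(ballot1, ballot2))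
--     return (not violated) and (proper or not strict)
-- ===== Notes on version B (the rewrite author's own statement) =====
-- stated objective: simpler
-- what changed: Replaced the early-return loop mutating the 'strict' flag with two independent any() scans (violation and proper-superset) combined in one boolean formula.
import Mathlib
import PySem

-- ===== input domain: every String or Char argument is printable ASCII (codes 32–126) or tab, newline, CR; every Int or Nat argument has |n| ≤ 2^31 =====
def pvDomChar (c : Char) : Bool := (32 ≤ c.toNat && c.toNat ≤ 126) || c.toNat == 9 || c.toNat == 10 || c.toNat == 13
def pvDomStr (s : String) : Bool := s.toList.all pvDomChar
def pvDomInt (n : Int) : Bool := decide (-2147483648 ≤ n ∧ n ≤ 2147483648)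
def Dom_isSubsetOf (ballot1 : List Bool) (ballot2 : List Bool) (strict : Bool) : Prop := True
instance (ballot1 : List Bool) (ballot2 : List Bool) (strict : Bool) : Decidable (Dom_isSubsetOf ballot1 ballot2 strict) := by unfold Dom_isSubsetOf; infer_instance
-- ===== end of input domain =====

-- B replaces A's flag-mutating early-return loop with two independent any-scans combined in one boolean formula (simpler).

-- ===== PORT A =====
-- A's loop over zip with the mutable 'strict' flag and early return, as structural recursion.
def isSubsetOfLoop : List (Bool × Bool) → Bool → Bool
  | [], strict => if strict then false else true
  | (b1, b2) :: rest, strict =>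
    if b1 && !b2 then false
    else if b2 && !b1 then isSubsetOfLoop rest false
    else isSubsetOfLoop rest strict

def isSubsetOf (ballot1 : List Bool) (ballot2 : List Bool) (strict : Bool) : Bool :=
  isSubsetOfLoop (ballot1.zip ballot2) strict

-- ===== PORT B =====
def isSubsetOf_alt (ballot1 : List Bool) (ballot2 : List Bool) (strict : Bool) : Bool :=
  let pairs := ballot1.zip ballot2
  let violated := pairs.any (fun p => p.1 && !p.2)
  let proper := pairs.any (fun p => p.2 && !p.1)
  !violated && (proper || !strict)

-- ===== PRECONDITION & SPEC =====
def Spec_isSubsetOf (ballot1 : List Bool) (ballot2 : List Bool) (strict : Bool) (out : Bool) : Prop := out = isSubsetOf_alt ballot1 ballot2 strict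
instance (ballot1 : List Bool) (ballot2 : List Bool) (strict : Bool) (out : Bool) : Decidable (Spec_isSubsetOf ballot1 ballot2 strict out) := by unfold Spec_isSubsetOf; infer_instance

-- ===== CLAIM (what is proved, stated in full; the proofs are below) =====
def Claim_equal_isSubsetOf : Prop := ∀ (ballot1 : List Bool) (ballot2 : List Bool) (strict : Bool), Dom_isSubsetOf ballot1 ballot2 strict → Spec_isSubsetOf ballot1 ballot2 strict (isSubsetOf ballot1 ballot2 strict)

-- ===== LEMMAS AND PROOFS =====
theorem isSubsetOfLoop_eq (ps : List (Bool × Bool)) (strict : Bool) :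
    isSubsetOfLoop ps strict =
      (!ps.any (fun p => p.1 && !p.2) && (ps.any (fun p => p.2 && !p.1) || !strict)) := by
  induction ps generalizing strict with
  | nil => cases strict <;> simp [isSubsetOfLoop]
  | cons hd tl ih =>
    obtain ⟨b1, b2⟩ := hd
    cases b1 <;> cases b2 <;> simp [isSubsetOfLoop, ih]

-- ===== VERDICT (by name: the statement is the Claim_ definition above) =====
theorem isSubsetOf_spec : Claim_equal_isSubsetOf := by
  intro ballot1 ballot2 strict _
  unfold Spec_isSubsetOf isSubsetOf isSubsetOf_alt
  exact isSubsetOfLoop_eq _ _
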